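-- pv_equiv track=rewrite | github.com/Guillen00/Python_Exercises | Python/6.binarios pro.py | eraseAux
-- ===== SOURCE A (Python) =====
-- def eraseAux(y,a,c):
--     if(y==0):
--         return 0
--     else:
--         if(y%10==a):
--             return eraseAux(y//10,a,c)
--         else:
--             return (y%10)*10*c+eraseAux(y//10,a,c+1)
-- ===== SOURCE B (Python) =====
-- def eraseAux(y, a, c):
--     digits = []
--     while y != 0:
--         digits.append(y % 10)
--         y //= 10
--     kept = [d for d in digits if d != a]
--     total = 0
--     for d in kept:
--         total += d * 10 * c
--         c += 1
--     return total
-- ===== Notes on version B (the rewrite author's own statement) =====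
-- stated objective: alternative
-- what changed: Replaced the single recursion by three staged passes: extract the decimal digits into a list, filter out digits equal to a, then fold the kept list with an accumulator and the advancing weight counter.
import Mathlib
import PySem

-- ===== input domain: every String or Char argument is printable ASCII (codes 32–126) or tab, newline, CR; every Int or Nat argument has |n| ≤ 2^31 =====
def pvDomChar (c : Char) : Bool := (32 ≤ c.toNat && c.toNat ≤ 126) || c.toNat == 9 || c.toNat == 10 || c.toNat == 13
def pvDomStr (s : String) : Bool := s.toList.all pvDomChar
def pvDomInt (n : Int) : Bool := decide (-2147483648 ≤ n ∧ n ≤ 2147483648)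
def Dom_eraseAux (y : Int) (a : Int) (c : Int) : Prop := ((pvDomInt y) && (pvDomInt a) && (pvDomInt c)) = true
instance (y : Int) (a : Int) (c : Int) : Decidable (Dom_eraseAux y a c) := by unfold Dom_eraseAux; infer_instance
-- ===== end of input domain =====

-- B replaces A's recursion by three staged passes (digit-list extraction, filter, fold); return value only, same cost; Pre_ excludes y < 0 where A never returns.


-- ===== PORT A =====
-- A's recursion runs on y; for y ≥ 0 (all of Pre_) Python's y % 10 / y // 10 coincide with
-- Nat mod/div, so the recursion is carried by a Nat helper (exact on Pre_; for y < 0 the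
-- Python recursion never returns).
def eraseAuxNat (n : Nat) (a : Int) (c : Int) : Int :=
  if n = 0 then 0
  else
    if ((n : Int) % 10) = a then eraseAuxNat (n / 10) a c
    else ((n : Int) % 10) * 10 * c + eraseAuxNat (n / 10) a (c + 1)
decreasing_by all_goals exact Nat.div_lt_self (Nat.pos_of_ne_zero (by assumption)) (by norm_num)

def eraseAux (y : Int) (a : Int) (c : Int) : Int := eraseAuxNat y.toNat a c

-- ===== PORT B =====
-- B pass 1: the while-loop collecting the decimal digits, least significant first
-- (Nat carrier is exact on Pre_; for y < 0 the Python loop never terminates).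
def digitsOf (n : Nat) : List Int :=
  if n = 0 then [] else ((n : Int) % 10) :: digitsOf (n / 10)
decreasing_by exact Nat.div_lt_self (Nat.pos_of_ne_zero (by assumption)) (by norm_num)

-- B passes 2 and 3: the filter comprehension, then the for-loop folding (total, c) over kept.
def eraseAux_alt (y : Int) (a : Int) (c : Int) : Int :=
  let digits := digitsOf y.toNat
  let kept := digits.filter (fun d => d != a)
  (kept.foldl (fun (s : Int × Int) d => (s.1 + d * 10 * s.2, s.2 + 1)) (0, c)).1

-- ===== PRECONDITION & SPEC =====
-- Pre_ excludes y < 0, where Python A recurses forever until RecursionError (y//10 stabilises at -1).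
def Pre_eraseAux (y : Int) (a : Int) (c : Int) : Prop := 0 ≤ y
instance (y : Int) (a : Int) (c : Int) : Decidable (Pre_eraseAux y a c) := by unfold Pre_eraseAux; infer_instance
def pvWitness_eraseAux : Int × Int × Int := (1203, 2, 1)

def Spec_eraseAux (y : Int) (a : Int) (c : Int) (out : Int) : Prop := out = eraseAux_alt y a c
instance (y : Int) (a : Int) (c : Int) (out : Int) : Decidable (Spec_eraseAux y a c out) := by unfold Spec_eraseAux; infer_instance

-- ===== CLAIM (what is proved, stated in full; the proofs are below) =====
def Claim_equal_eraseAux : Prop := ∀ (y : Int) (a : Int) (c : Int), Dom_eraseAux y a c → Pre_eraseAux y a c → Spec_eraseAux y a c (eraseAux y a c)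

-- ===== LEMMAS AND PROOFS =====
-- Accumulator extraction for B's fold: the total component is the start plus the fold from 0.
theorem fold_acc (l : List Int) (t c : Int) :
    (l.foldl (fun (s : Int × Int) d => (s.1 + d * 10 * s.2, s.2 + 1)) (t, c)).1
      = t + (l.foldl (fun (s : Int × Int) d => (s.1 + d * 10 * s.2, s.2 + 1)) (0, c)).1 := by
  induction l generalizing t c with
  | nil => simp
  | cons d l ih =>
      simp only [List.foldl_cons]
      rw [ih, ih (0 + d * 10 * c)]
      ring

-- A's recursion equals B's filter-then-fold over the digit list.
theorem eraseAuxNat_eq_fold (n : Nat) (a c : Int) :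
    eraseAuxNat n a c
      = (((digitsOf n).filter (fun d => d != a)).foldl
          (fun (s : Int × Int) d => (s.1 + d * 10 * s.2, s.2 + 1)) (0, c)).1 := by
  induction n using Nat.strong_induction_on generalizing c with
  | _ n ih =>
    rw [eraseAuxNat, digitsOf]
    by_cases h0 : n = 0
    · simp [h0]
    · have hlt : n / 10 < n := Nat.div_lt_self (Nat.pos_of_ne_zero h0) (by norm_num)
      by_cases hd : ((n : Int) % 10) = a
      · simp [h0, hd, ih _ hlt]
      · simp only [h0, if_false, hd, List.filter_cons, bne_iff_ne, ne_eq,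
          not_false_iff, if_true, List.foldl_cons]
        rw [fold_acc, ← ih _ hlt (c + 1)]
        ring

-- ===== VERDICT (by name: the statement is the Claim_ definition above) =====
theorem eraseAux_spec : Claim_equal_eraseAux := by
  intro y a c _ _
  unfold Spec_eraseAux eraseAux eraseAux_alt
  rw [eraseAuxNat_eq_fold]
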